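-- pv_equiv track=rewrite | github.com/HandyWote/Py-Algorithm | [NOIP1997 普及组] 棋盘问题.py | count_squares_and_rectangles
-- ===== SOURCE A (Python) =====
-- def count_squares_and_rectangles(n, m):
--     ans1 = 0  # 正方形的数量
--     ans2 = 0  # 长方形的数量
--     for i in range(n):
--         for j in range(m):
--             for ii in range(i + 1, n + 1):
--                 for jj in range(j + 1, m + 1):
--                     if ii - i == jj - j:
--                         ans1 += 1
--                     else:
--                         ans2 += 1
--     return ans1, ans2
-- ===== SOURCE B (Python) =====
-- def count_squares_and_rectangles(n, m):
--     nn = max(n, 0)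
--     mm = max(m, 0)
--     total = (nn * (nn + 1) // 2) * (mm * (mm + 1) // 2)
--     squares = 0
--     for k in range(min(nn, mm)):
--         squares += (nn - k) * (mm - k)
--     return squares, total - squares
-- ===== Notes on version B (the rewrite author's own statement) =====
-- stated objective: faster
-- what changed: Replaced the O(n^2 m^2) quadruple loop over all rectangle corner pairs with a closed form: total rectangles = (n(n+1)/2)(m(m+1)/2) and squares = sum over side length k of (n-k)(m-k), an O(min(n,m)) single loop.
import Mathlib
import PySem

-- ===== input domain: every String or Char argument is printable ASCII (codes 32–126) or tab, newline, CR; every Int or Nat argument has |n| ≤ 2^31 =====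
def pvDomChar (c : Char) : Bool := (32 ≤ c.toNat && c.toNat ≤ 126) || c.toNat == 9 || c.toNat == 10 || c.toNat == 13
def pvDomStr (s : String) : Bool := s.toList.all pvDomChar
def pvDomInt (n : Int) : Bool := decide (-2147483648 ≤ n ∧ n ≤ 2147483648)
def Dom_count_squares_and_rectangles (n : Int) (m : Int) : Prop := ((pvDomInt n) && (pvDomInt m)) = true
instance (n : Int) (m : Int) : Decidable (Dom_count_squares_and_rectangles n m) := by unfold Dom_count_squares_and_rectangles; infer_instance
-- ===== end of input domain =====

-- B replaces A's quadruple loop over rectangle corner pairs with the closed form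
-- total = (n(n+1)//2)*(m(m+1)//2) and a single loop over square side lengths (objective: faster).


-- ===== PORT A =====
-- Python returns the tuple (ans1, ans2); rendered as the two-element list [ans1, ans2].
def count_squares_and_rectangles (n : Int) (m : Int) : List Int :=
  let r : Int × Int :=
    (PySem.List.pyRange 0 n 1).foldl (fun (s : Int × Int) i =>
      (PySem.List.pyRange 0 m 1).foldl (fun (s : Int × Int) j =>
        (PySem.List.pyRange (i + 1) (n + 1) 1).foldl (fun (s : Int × Int) ii =>
          (PySem.List.pyRange (j + 1) (m + 1) 1).foldl (fun (s : Int × Int) jj =>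
            if ii - i == jj - j then (s.1 + 1, s.2) else (s.1, s.2 + 1)) s) s) s) (0, 0)
  [r.1, r.2]

-- ===== PORT B =====
def count_squares_and_rectangles_alt (n : Int) (m : Int) : List Int :=
  let nn := max n 0
  let mm := max m 0
  let total := PySem.Int.floordiv (nn * (nn + 1)) 2 * PySem.Int.floordiv (mm * (mm + 1)) 2
  let squares := (PySem.List.pyRange 0 (min nn mm) 1).foldl (fun acc k => acc + (nn - k) * (mm - k)) 0
  [squares, total - squares]

-- ===== PRECONDITION & SPEC =====
def Spec_count_squares_and_rectangles (n : Int) (m : Int) (out : List Int) : Prop := out = count_squares_and_rectangles_alt n m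
instance (n : Int) (m : Int) (out : List Int) : Decidable (Spec_count_squares_and_rectangles n m out) := by unfold Spec_count_squares_and_rectangles; infer_instance

-- ===== CLAIM (what is proved, stated in full; the proofs are below) =====
def Claim_equal_count_squares_and_rectangles : Prop := ∀ (n : Int) (m : Int), Dom_count_squares_and_rectangles n m → Spec_count_squares_and_rectangles n m (count_squares_and_rectangles n m)

-- ===== LEMMAS AND PROOFS =====

-- Gauss sum 1 + 2 + ⋯ + t and the A-side squares count, as Finset sums.
noncomputable def pvG (t : Int) : Int := ∑ x ∈ Finset.Icc (1 : Int) t, x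
noncomputable def pvSq (n m : Int) : Int := ∑ a ∈ Finset.Icc (1 : Int) n, ∑ d ∈ Finset.Icc (1 : Int) m, min a d

-- a list-sum over pyRange is a Finset sum over Ico
lemma pv_sum_map_pyRange (a b : Int) (f : Int → Int) :
    ((PySem.List.pyRange a b 1).map f).sum = ∑ x ∈ Finset.Ico a b, f x := by
  induction h : (b - a).toNat generalizing a with
  | zero =>
      rw [PySem.List.pyRange_one_eq_nil (by omega), Finset.Ico_eq_empty (by simp; omega)]
      simp
  | succ k ih =>
      have hab : a < b := by omega
      rw [PySem.List.pyRange_one_cons hab, ← Finset.insert_Ico_add_one_left_eq_Ico hab,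
        Finset.sum_insert (by simp)]
      simp only [List.map_cons, List.sum_cons]
      rw [ih (a + 1) (by omega)]

-- a two-accumulator additive loop is a pair of Finset sums
lemma pv_pairfold (a b : Int) (f g : Int → Int) (s : Int × Int) :
    (PySem.List.pyRange a b 1).foldl (fun s x => (s.1 + f x, s.2 + g x)) s
      = (s.1 + ∑ x ∈ Finset.Ico a b, f x, s.2 + ∑ x ∈ Finset.Ico a b, g x) := by
  obtain ⟨p, q⟩ := s
  rw [PySem.List.foldl_prod_mk (f := fun acc x => acc + f x) (g := fun acc x => acc + g x),
    PySem.List.foldl_add, PySem.List.foldl_add, pv_sum_map_pyRange, pv_sum_map_pyRange]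

lemma pv_sum_ind_le (a b c : Int) :
    (∑ x ∈ Finset.Ico a b, if x ≤ c then (1 : Int) else 0) = max 0 (min b (c + 1) - a) := by
  rw [Finset.sum_boole]
  have h : (Finset.Ico a b).filter (fun x => x ≤ c) = Finset.Ico a (min b (c + 1)) := by
    ext x; simp only [Finset.mem_Ico, Finset.mem_filter]; omega
  rw [h, Int.card_Ico]; omega

lemma pv_sum_ind_ge (a b c : Int) :
    (∑ x ∈ Finset.Ico a b, if c ≤ x then (1 : Int) else 0) = max 0 (b - max a c) := by
  rw [Finset.sum_boole]
  have h : (Finset.Ico a b).filter (fun x => c ≤ x) = Finset.Ico (max a c) b := by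
    ext x; simp only [Finset.mem_Ico, Finset.mem_filter]; omega
  rw [h, Int.card_Ico]; omega

lemma pv_sum_const (a b c : Int) : (∑ _x ∈ Finset.Ico a b, c) = max 0 (b - a) * c := by
  rw [Finset.sum_const, Int.card_Ico, nsmul_eq_mul]; rw [show ((b - a).toNat : Int) = max 0 (b - a) by omega]

lemma pv_sum_eq_ind (a b v : Int) :
    (∑ x ∈ Finset.Ico a b, if x = v then (1 : Int) else 0) = if a ≤ v ∧ v < b then 1 else 0 := by
  by_cases h : a ≤ v ∧ v < b
  · rw [Finset.sum_ite_eq_of_mem' _ v (fun _ => (1 : Int)) (Finset.mem_Ico.mpr h), if_pos h]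
  · rw [if_neg h, Finset.sum_congr rfl (fun x hx => ?_), Finset.sum_const_zero]
    simp only [Finset.mem_Ico] at hx
    rw [if_neg (by rintro rfl; exact h ⟨hx.1, hx.2⟩)]

-- reflection j ↦ m - j
lemma pv_reflect (m : Int) (F : Int → Int) :
    (∑ j ∈ Finset.Ico 0 m, F (m - j)) = ∑ d ∈ Finset.Icc 1 m, F d := by
  apply Finset.sum_nbij' (i := fun j => m - j) (j := fun d => m - d) <;>
    intros <;> simp_all [Finset.mem_Ico, Finset.mem_Icc] <;> omega

-- shift k ↦ k + 1
lemma pv_shift (t : Int) (F : Int → Int) :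
    (∑ k ∈ Finset.Icc 1 t, F k) = ∑ k ∈ Finset.Ico 0 t, F (k + 1) := by
  apply Finset.sum_nbij' (i := fun k => k - 1) (j := fun k => k + 1) <;>
    intros <;> simp_all [Finset.mem_Ico, Finset.mem_Icc]

-- the innermost jj-loop
lemma pv_inner_jj (m i j ii : Int) (s : Int × Int) :
    (PySem.List.pyRange (j + 1) (m + 1) 1).foldl (fun (s : Int × Int) jj =>
        if ii - i == jj - j then (s.1 + 1, s.2) else (s.1, s.2 + 1)) s
      = (s.1 + (if 1 ≤ ii - i ∧ ii - i ≤ m - j then (1 : Int) else 0),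
         s.2 + (max 0 (m - j) - (if 1 ≤ ii - i ∧ ii - i ≤ m - j then 1 else 0))) := by
  have hstep : (fun (s : Int × Int) jj => if ii - i == jj - j then (s.1 + 1, s.2) else (s.1, s.2 + 1))
      = fun (s : Int × Int) jj => (s.1 + (if jj = j + (ii - i) then 1 else 0),
          s.2 + (1 - (if jj = j + (ii - i) then 1 else 0))) := by
    funext s jj
    by_cases h : ii - i = jj - j
    · rw [if_pos (by simpa using h), if_pos (by omega)]; simp
    · rw [if_neg (by simpa using h), if_neg (by omega)]; simp
  rw [hstep, pv_pairfold, pv_sum_eq_ind]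
  have h2 : (∑ x ∈ Finset.Ico (j + 1) (m + 1), (1 - if x = j + (ii - i) then (1 : Int) else 0))
      = max 0 (m - j) - (if 1 ≤ ii - i ∧ ii - i ≤ m - j then 1 else 0) := by
    rw [Finset.sum_sub_distrib, pv_sum_eq_ind, pv_sum_const]
    congr 1
    · omega
    · exact if_congr (by omega) rfl rfl
  rw [h2]
  congr 2
  exact if_congr (by omega) rfl rfl

-- the ii-loop
lemma pv_inner_ii (n m i j : Int) (hi : i < n) (hj : j < m) (s : Int × Int) :
    (PySem.List.pyRange (i + 1) (n + 1) 1).foldl (fun (s : Int × Int) ii =>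
        (PySem.List.pyRange (j + 1) (m + 1) 1).foldl (fun (s : Int × Int) jj =>
          if ii - i == jj - j then (s.1 + 1, s.2) else (s.1, s.2 + 1)) s) s
      = (s.1 + min (n - i) (m - j),
         s.2 + ((n - i) * (m - j) - min (n - i) (m - j))) := by
  refine Eq.trans (b := (PySem.List.pyRange (i + 1) (n + 1) 1).foldl (fun (s : Int × Int) ii =>
        (s.1 + (if ii ≤ i + (m - j) then 1 else 0),
         s.2 + ((m - j) - (if ii ≤ i + (m - j) then 1 else 0)))) s)
      (PySem.List.foldl_congr_mem _ _ _ _ ?_) ?_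
  · intro acc ii hii
    rw [PySem.List.mem_pyRange_one] at hii
    rw [pv_inner_jj]
    have h1 : (if 1 ≤ ii - i ∧ ii - i ≤ m - j then (1 : Int) else 0)
        = if ii ≤ i + (m - j) then 1 else 0 := if_congr (by omega) rfl rfl
    rw [h1]
    congr 1
    omega
  rw [pv_pairfold, pv_sum_ind_le]
  have h2 : (∑ x ∈ Finset.Ico (i + 1) (n + 1), ((m - j) - if x ≤ i + (m - j) then (1 : Int) else 0))
      = (n - i) * (m - j) - min (n - i) (m - j) := by
    rw [Finset.sum_sub_distrib, pv_sum_ind_le, pv_sum_const,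
      show max 0 (n + 1 - (i + 1)) = n - i from by omega]
    congr 1
    omega
  rw [h2]
  congr 2
  omega

-- the j-loop
lemma pv_inner_j (n m i : Int) (hi : i < n) (s : Int × Int) :
    (PySem.List.pyRange 0 m 1).foldl (fun (s : Int × Int) j =>
        (PySem.List.pyRange (i + 1) (n + 1) 1).foldl (fun (s : Int × Int) ii =>
          (PySem.List.pyRange (j + 1) (m + 1) 1).foldl (fun (s : Int × Int) jj =>
            if ii - i == jj - j then (s.1 + 1, s.2) else (s.1, s.2 + 1)) s) s) s
      = (s.1 + ∑ d ∈ Finset.Icc 1 m, min (n - i) d,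
         s.2 + ((n - i) * pvG m - ∑ d ∈ Finset.Icc 1 m, min (n - i) d)) := by
  refine Eq.trans (b := (PySem.List.pyRange 0 m 1).foldl (fun (s : Int × Int) j =>
        (s.1 + min (n - i) (m - j),
         s.2 + ((n - i) * (m - j) - min (n - i) (m - j)))) s)
      (PySem.List.foldl_congr_mem _ _ _ _ ?_) ?_
  · intro acc j hj
    rw [PySem.List.mem_pyRange_one] at hj
    exact pv_inner_ii n m i j hi hj.2 acc
  rw [pv_pairfold]
  rw [pv_reflect m (fun d => min (n - i) d)]
  rw [show (∑ j ∈ Finset.Ico 0 m, ((n - i) * (m - j) - min (n - i) (m - j)))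
      = ∑ j ∈ Finset.Ico 0 m, (fun d => (n - i) * d - min (n - i) d) (m - j) from rfl]
  rw [pv_reflect m (fun d => (n - i) * d - min (n - i) d)]
  rw [Finset.sum_sub_distrib, ← Finset.mul_sum]
  rfl

-- the outer i-loop: A's accumulator in closed form
lemma pv_outer (n m : Int) :
    (PySem.List.pyRange 0 n 1).foldl (fun (s : Int × Int) i =>
      (PySem.List.pyRange 0 m 1).foldl (fun (s : Int × Int) j =>
        (PySem.List.pyRange (i + 1) (n + 1) 1).foldl (fun (s : Int × Int) ii =>
          (PySem.List.pyRange (j + 1) (m + 1) 1).foldl (fun (s : Int × Int) jj =>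
            if ii - i == jj - j then (s.1 + 1, s.2) else (s.1, s.2 + 1)) s) s) s) (0, 0)
      = (pvSq n m, pvG n * pvG m - pvSq n m) := by
  refine Eq.trans (b := (PySem.List.pyRange 0 n 1).foldl (fun (s : Int × Int) i =>
        (s.1 + ∑ d ∈ Finset.Icc 1 m, min (n - i) d,
         s.2 + ((n - i) * pvG m - ∑ d ∈ Finset.Icc 1 m, min (n - i) d))) (0, 0))
      (PySem.List.foldl_congr_mem _ _ _ _ ?_) ?_
  · intro acc i hi
    rw [PySem.List.mem_pyRange_one] at hi
    exact pv_inner_j n m i hi.2 acc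
  rw [pv_pairfold]
  rw [show (∑ i ∈ Finset.Ico 0 n, ∑ d ∈ Finset.Icc 1 m, min (n - i) d)
      = ∑ i ∈ Finset.Ico 0 n, (fun a => ∑ d ∈ Finset.Icc 1 m, min a d) (n - i) from rfl]
  rw [pv_reflect n (fun a => ∑ d ∈ Finset.Icc 1 m, min a d)]
  rw [show (∑ i ∈ Finset.Ico 0 n, ((n - i) * pvG m - ∑ d ∈ Finset.Icc 1 m, min (n - i) d))
      = ∑ i ∈ Finset.Ico 0 n, (fun a => a * pvG m - ∑ d ∈ Finset.Icc 1 m, min a d) (n - i) from rfl]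
  rw [pv_reflect n (fun a => a * pvG m - ∑ d ∈ Finset.Icc 1 m, min a d)]
  rw [Finset.sum_sub_distrib, ← Finset.sum_mul]
  simp [pvSq, pvG]

-- Gauss: the floordiv closed form equals pvG
lemma pv_gauss_nat (N : ℕ) : 2 * (∑ x ∈ Finset.Icc (1 : Int) (N : Int), x) = N * (N + 1) := by
  induction N with
  | zero => simp
  | succ k ih =>
      have h : Finset.Icc (1 : Int) ((k : Int) + 1) = insert ((k : Int) + 1) (Finset.Icc 1 (k : Int)) := by
        ext x; simp [Finset.mem_Icc, Finset.mem_insert]; omega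
      push_cast
      rw [h, Finset.sum_insert (by simp)]
      push_cast at ih
      ring_nf
      ring_nf at ih
      omega

lemma pv_gauss (t : Int) (ht : 0 ≤ t) : PySem.Int.floordiv (t * (t + 1)) 2 = pvG t := by
  obtain ⟨N, rfl⟩ := Int.eq_ofNat_of_zero_le ht
  have h2 := pv_gauss_nat N
  rw [PySem.Int.floordiv_eq_ediv_of_pos (by norm_num)]
  unfold pvG
  omega

lemma pv_G_clamp (n : Int) : pvG (max n 0) = pvG n := by
  by_cases h : 0 ≤ n
  · rw [max_eq_left h]
  · unfold pvG
    rw [show max n 0 = 0 from by omega, Finset.Icc_eq_empty (by omega), Finset.Icc_eq_empty (by omega)]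

-- the double-counting identity: squares counted cell-by-cell = squares counted by side length
lemma pv_sq_eq (n m : Int) (hn : 0 ≤ n) (hm : 0 ≤ m) :
    pvSq n m = ∑ k ∈ Finset.Ico 0 (min n m), (n - k) * (m - k) := by
  have hterm : ∀ a ∈ Finset.Icc (1 : Int) n, ∀ d ∈ Finset.Icc (1 : Int) m,
      min a d = ∑ k ∈ Finset.Icc (1 : Int) (min n m),
        (if k ≤ a then (1 : Int) else 0) * (if k ≤ d then 1 else 0) := by
    intro a ha d hd
    simp only [Finset.mem_Icc] at ha hd
    have h1 : ∀ k : Int, (if k ≤ a then (1 : Int) else 0) * (if k ≤ d then 1 else 0)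
        = if k ≤ min a d then 1 else 0 := by
      intro k
      by_cases h : k ≤ a <;> by_cases h' : k ≤ d <;> simp_all
      all_goals omega
    rw [Finset.sum_congr rfl (fun k _ => h1 k)]
    rw [← Finset.Ico_add_one_right_eq_Icc, pv_sum_ind_le]
    omega
  calc pvSq n m
      = ∑ a ∈ Finset.Icc (1 : Int) n, ∑ d ∈ Finset.Icc (1 : Int) m,
          ∑ k ∈ Finset.Icc (1 : Int) (min n m),
            (if k ≤ a then (1 : Int) else 0) * (if k ≤ d then 1 else 0) := by
        unfold pvSq
        exact Finset.sum_congr rfl (fun a ha => Finset.sum_congr rfl (fun d hd => hterm a ha d hd))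
    _ = ∑ k ∈ Finset.Icc (1 : Int) (min n m), ∑ a ∈ Finset.Icc (1 : Int) n,
          ∑ d ∈ Finset.Icc (1 : Int) m,
            (if k ≤ a then (1 : Int) else 0) * (if k ≤ d then 1 else 0) := by
        have h1 : (∑ a ∈ Finset.Icc (1 : Int) n, ∑ d ∈ Finset.Icc (1 : Int) m,
            ∑ k ∈ Finset.Icc (1 : Int) (min n m),
              (if k ≤ a then (1 : Int) else 0) * (if k ≤ d then 1 else 0))
          = ∑ a ∈ Finset.Icc (1 : Int) n, ∑ k ∈ Finset.Icc (1 : Int) (min n m),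
              ∑ d ∈ Finset.Icc (1 : Int) m,
                (if k ≤ a then (1 : Int) else 0) * (if k ≤ d then 1 else 0) :=
          Finset.sum_congr rfl (fun a _ => Finset.sum_comm)
        rw [h1]
        exact Finset.sum_comm
    _ = ∑ k ∈ Finset.Icc (1 : Int) (min n m), (n - k + 1) * (m - k + 1) := by
        refine Finset.sum_congr rfl (fun k hk => ?_)
        simp only [Finset.mem_Icc] at hk
        rw [show (∑ a ∈ Finset.Icc (1 : Int) n, ∑ d ∈ Finset.Icc (1 : Int) m,
            (if k ≤ a then (1 : Int) else 0) * (if k ≤ d then 1 else 0))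
          = ∑ a ∈ Finset.Icc (1 : Int) n,
            (if k ≤ a then (1 : Int) else 0) * ∑ d ∈ Finset.Icc (1 : Int) m,
              (if k ≤ d then (1 : Int) else 0) from
          Finset.sum_congr rfl (fun a _ => (Finset.mul_sum _ _ _).symm)]
        rw [← Finset.sum_mul]
        rw [← Finset.Ico_add_one_right_eq_Icc, ← Finset.Ico_add_one_right_eq_Icc,
          pv_sum_ind_ge, pv_sum_ind_ge]
        have hkn : k ≤ n := by omega
        have hkm : k ≤ m := by omega
        rw [show max 0 (n + 1 - max 1 k) = n - k + 1 by omega,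
          show max 0 (m + 1 - max 1 k) = m - k + 1 by omega]
    _ = ∑ k ∈ Finset.Ico 0 (min n m), (n - k) * (m - k) := by
        rw [pv_shift (min n m) (fun k => (n - k + 1) * (m - k + 1))]
        exact Finset.sum_congr rfl (fun k _ => by ring)

-- the B-side single loop in closed form
lemma pv_alt_squares (a b : Int) :
    (PySem.List.pyRange 0 (min a b) 1).foldl (fun acc k => acc + (a - k) * (b - k)) 0
      = ∑ k ∈ Finset.Ico 0 (min a b), (a - k) * (b - k) := by
  rw [PySem.List.foldl_add, pv_sum_map_pyRange]
  ring

-- ===== VERDICT (by name: the statement is the Claim_ definition above) =====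
theorem count_squares_and_rectangles_spec : Claim_equal_count_squares_and_rectangles := by
  intro n m _
  unfold Spec_count_squares_and_rectangles count_squares_and_rectangles count_squares_and_rectangles_alt
  simp only []
  rw [pv_outer, pv_alt_squares, pv_gauss (max n 0) (le_max_right n 0),
    pv_gauss (max m 0) (le_max_right m 0), pv_G_clamp, pv_G_clamp]
  have hsq : (∑ k ∈ Finset.Ico 0 (min (max n 0) (max m 0)), (max n 0 - k) * (max m 0 - k)) = pvSq n m := by
    by_cases hn : 0 ≤ n
    · by_cases hm : 0 ≤ m
      · rw [max_eq_left hn, max_eq_left hm, pv_sq_eq n m hn hm]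
      · rw [show max m 0 = 0 from by omega]
        unfold pvSq
        rw [show min (max n 0) 0 = 0 from by omega, Finset.Ico_eq_empty (by omega), Finset.sum_empty]
        rw [Finset.sum_congr rfl (fun a _ => by rw [Finset.Icc_eq_empty (by omega), Finset.sum_empty]),
          Finset.sum_const_zero]
    · rw [show max n 0 = 0 from by omega]
      unfold pvSq
      rw [show min 0 (max m 0) = 0 from by omega, Finset.Ico_eq_empty (by omega), Finset.sum_empty]
      rw [Finset.Icc_eq_empty (by omega), Finset.sum_empty]
  rw [hsq]
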